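-- pv_equiv track=rewrite | github.com/hmontoyag/kattis-problems | CombinationLock/main.py | clockwise_distance
-- ===== SOURCE A (Python) =====
-- def clockwise_distance(curr, target):
--     #0 ---- 39
--     i = 0
--     while curr != target:
--         i+=1
--         curr -= 1
--         if curr < 0:
--             curr = 39
--     return i
-- ===== SOURCE B (Python) =====
-- def clockwise_distance(curr, target):
--     # Clockwise distance on a 40-position dial, as a single modulo.
--     return (curr - target) % 40
-- ===== Notes on version B (the rewrite author's own statement) =====
-- stated objective: simpler
-- what changed: Replaced the step-by-step decrement loop with the closed-form modulo (curr - target) % 40; Pre_ restricts to the dial's natural domain 0..39 for both positions, since outside it A loops forever on most inputs and on the rest its step counts are artefacts of the decrement loop over positions that do not exist on the dial.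
-- outside the precondition, e.g. on clockwise_distance(50, 10): A returns 40, B returns 0; on clockwise_distance(-3, 5): A returns 35, B returns 32; on clockwise_distance(5, -1): A does not finish within the time limit, B returns 6
import Mathlib
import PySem

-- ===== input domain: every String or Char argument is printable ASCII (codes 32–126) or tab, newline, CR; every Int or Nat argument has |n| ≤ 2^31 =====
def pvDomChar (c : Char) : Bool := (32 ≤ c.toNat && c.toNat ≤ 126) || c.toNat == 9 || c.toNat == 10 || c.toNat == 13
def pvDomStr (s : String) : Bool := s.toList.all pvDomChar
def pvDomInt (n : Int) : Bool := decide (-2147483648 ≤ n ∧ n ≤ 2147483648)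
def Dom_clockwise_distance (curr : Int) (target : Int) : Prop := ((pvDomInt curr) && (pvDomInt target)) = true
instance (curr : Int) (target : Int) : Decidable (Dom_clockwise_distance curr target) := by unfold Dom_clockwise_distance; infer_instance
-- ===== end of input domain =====

-- B replaces A's step-by-step decrement loop by the closed-form modulo (curr - target) % 40 on valid dial positions 0..39 (objective: simpler).


-- ===== PORT A =====
-- A's while loop, transliterated with a fuel bound; on every input satisfying
-- Pre_ the fuel is never exhausted (the loop makes fewer than 40 steps there).
def clockwiseLoopA : Nat → Int → Int → Int → Int
  | 0, _, _, i => i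
  | fuel + 1, curr, target, i =>
    if curr ≠ target then
      let i' := i + 1
      let c' := curr - 1
      let c'' := if c' < 0 then (39 : Int) else c'
      clockwiseLoopA fuel c'' target i'
    else i

def clockwise_distance (curr : Int) (target : Int) : Int :=
  clockwiseLoopA (curr.toNat + 41) curr target 0

-- ===== PORT B =====
def clockwise_distance_alt (curr : Int) (target : Int) : Int :=
  PySem.Int.mod (curr - target) 40

-- ===== PRECONDITION & SPEC =====
-- Pre_ restricts to the dial's natural domain 0..39 for both positions; outside it
-- A loops forever on most inputs and on the rest its step counts are artefacts of
-- the decrement loop over positions that do not exist on a 40-position dial.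
def Pre_clockwise_distance (curr : Int) (target : Int) : Prop :=
  0 ≤ curr ∧ curr ≤ 39 ∧ 0 ≤ target ∧ target ≤ 39
instance (curr : Int) (target : Int) : Decidable (Pre_clockwise_distance curr target) := by
  unfold Pre_clockwise_distance; infer_instance

def pvWitness_clockwise_distance : Int × Int := (5, 17)

def Spec_clockwise_distance (curr : Int) (target : Int) (out : Int) : Prop := out = clockwise_distance_alt curr target
instance (curr : Int) (target : Int) (out : Int) : Decidable (Spec_clockwise_distance curr target out) := by unfold Spec_clockwise_distance; infer_instance

-- ===== CLAIM (what is proved, stated in full; the proofs are below) =====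
def Claim_equal_clockwise_distance : Prop := ∀ (curr : Int) (target : Int), Dom_clockwise_distance curr target → Pre_clockwise_distance curr target → Spec_clockwise_distance curr target (clockwise_distance curr target)

-- ===== LEMMAS AND PROOFS =====

-- Loop invariant: with both positions on the dial and enough fuel, the loop
-- returns i plus the clockwise distance (curr - target) mod 40.
lemma clockwiseLoopA_eq : ∀ (fuel : Nat) (curr target i : Int),
    0 ≤ curr → curr ≤ 39 → 0 ≤ target → target ≤ 39 →
    (curr - target) % 40 ≤ (fuel : Int) →
    clockwiseLoopA fuel curr target i = i + (curr - target) % 40 := by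
  intro fuel
  induction fuel with
  | zero =>
    intro curr target i h1 h2 h3 h4 hfuel
    simp only [clockwiseLoopA]
    omega
  | succ f ih =>
    intro curr target i h1 h2 h3 h4 hfuel
    by_cases hne : curr = target
    · simp [clockwiseLoopA, hne]
    · have hstep : clockwiseLoopA (f + 1) curr target i
          = clockwiseLoopA f (if curr - 1 < 0 then (39 : Int) else curr - 1) target (i + 1) := by
        simp [clockwiseLoopA, hne]
      rw [hstep]
      set c' : Int := if curr - 1 < 0 then (39 : Int) else curr - 1 with hc'
      have hb : 0 ≤ c' ∧ c' ≤ 39 := by rw [hc']; split_ifs <;> omega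
      have hkey : (c' - target) % 40 = (curr - target) % 40 - 1 := by
        rw [hc']; split_ifs <;> omega
      rw [ih c' target (i + 1) hb.1 hb.2 h3 h4 (by omega)]
      omega

-- ===== VERDICT (by name: the statement is the Claim_ definition above) =====
theorem clockwise_distance_spec : Claim_equal_clockwise_distance := by
  intro curr target _ hpre
  obtain ⟨h1, h2, h3, h4⟩ := hpre
  unfold Spec_clockwise_distance clockwise_distance clockwise_distance_alt
  rw [PySem.Int.mod_eq_emod_of_pos (by norm_num)]
  rw [clockwiseLoopA_eq (curr.toNat + 41) curr target 0 h1 h2 h3 h4 (by omega)]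
  omega
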